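-- pv_equiv track=rewrite | github.com/serena-yu17/UNSW | COMP9021/Assignment_2/sudoku.py | checkunit
-- ===== SOURCE A (Python) =====
-- from collections import defaultdict
--
-- def checkunit(lst):
--     dic = defaultdict(int)
--     if isinstance(lst[0], int):
--         for e in lst:
--             if e != 0:
--                 dic[e] += 1
--                 if dic[e] > 1:  # repeat
--                     return 0
--     return 1
-- ===== SOURCE B (Python) =====
-- def checkunit(lst):
--     if isinstance(lst[0], int):
--         vals = sorted(e for e in lst if e != 0)
--         return 0 if any(a == b for a, b in zip(vals, vals[1:])) else 1
--     return 1
-- ===== Notes on version B (the rewrite author's own statement) =====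
-- stated objective: alternative
-- what changed: Replaces the defaultdict counting loop with early exit by a sort-based method: filter the nonzero values, sort them, and report a duplicate iff some adjacent pair in the sorted list is equal (no hash structure at all).
import Mathlib
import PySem

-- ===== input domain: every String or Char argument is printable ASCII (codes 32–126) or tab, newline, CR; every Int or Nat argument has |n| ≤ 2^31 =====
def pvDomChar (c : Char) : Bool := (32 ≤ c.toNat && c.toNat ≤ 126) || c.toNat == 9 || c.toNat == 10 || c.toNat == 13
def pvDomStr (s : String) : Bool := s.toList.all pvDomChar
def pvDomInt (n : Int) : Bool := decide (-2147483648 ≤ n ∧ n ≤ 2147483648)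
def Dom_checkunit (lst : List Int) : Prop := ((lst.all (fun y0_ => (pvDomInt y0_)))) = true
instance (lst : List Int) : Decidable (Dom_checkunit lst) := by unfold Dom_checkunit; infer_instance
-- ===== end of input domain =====

-- B sorts the nonzero values and reports a duplicate iff two adjacent sorted values are
-- equal, instead of A's defaultdict counting loop with early exit. Equivalence is on the
-- return value; both raise IndexError on the empty list (excluded by Pre_).

-- ===== PORT A =====
-- the loop 'for e in lst: if e != 0: dic[e] += 1; if dic[e] > 1: return 0'
def checkunitLoop : PySem.Dict Int Int → List Int → Int
  | _, [] => 1
  | dic, e :: rest =>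
    if e ≠ 0 then
      let dic' := dic.insert e (dic.getD e 0 + 1)
      if dic'.getD e 0 > 1 then 0 else checkunitLoop dic' rest
    else checkunitLoop dic rest

-- the isinstance guard on the first element is always true for List Int; that access raises on the empty list (see Pre_)
def checkunit (lst : List Int) : Int := checkunitLoop PySem.Dict.empty lst

-- ===== PORT B =====
-- vals = sorted(e for e in lst if e != 0); 0 if any(a == b for a, b in zip(vals, vals[1:])) else 1
def checkunit_alt (lst : List Int) : Int :=
  let vals := PySem.List.sorted (lst.filter (fun e => e ≠ 0)) (fun x => x) false
  if (vals.zip (vals.drop 1)).any (fun p => p.1 == p.2) then 0 else 1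

-- ===== PRECONDITION & SPEC =====
-- Pre_ excludes the empty list, on which the first-element access raises IndexError (in A and in B alike).
def Pre_checkunit (lst : List Int) : Prop := lst ≠ []
instance (lst : List Int) : Decidable (Pre_checkunit lst) := by unfold Pre_checkunit; infer_instance
def pvWitness_checkunit : List Int := ([1, 2, 3])

def Spec_checkunit (lst : List Int) (out : Int) : Prop := out = checkunit_alt lst
instance (lst : List Int) (out : Int) : Decidable (Spec_checkunit lst out) := by unfold Spec_checkunit; infer_instance

-- ===== CLAIM (what is proved, stated in full; the proofs are below) =====
def Claim_equal_checkunit : Prop := ∀ (lst : List Int), Dom_checkunit lst → Pre_checkunit lst → Spec_checkunit lst (checkunit lst)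

-- ===== LEMMAS AND PROOFS =====

-- A's loop, run with a dict recording exactly the already-seen (nonzero, pairwise distinct)
-- values with count 1, decides Nodup of seen ++ the nonzero suffix.
lemma checkunitLoop_eq (rest : List Int) : ∀ (dic : PySem.Dict Int Int) (seen : List Int),
    seen.Nodup →
    (∀ a, dic.getD a 0 = if a ∈ seen then 1 else 0) →
    checkunitLoop dic rest
      = if (seen ++ rest.filter (fun e => decide (e ≠ 0))).Nodup then 1 else 0 := by
  induction rest with
  | nil =>
    intro dic seen hnd _
    simp [checkunitLoop, hnd]
  | cons e rest ih =>
    intro dic seen hnd hinv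
    by_cases he : e = 0
    · subst he
      simpa [checkunitLoop] using ih dic seen hnd hinv
    · have hget : dic.getD e 0 = if e ∈ seen then 1 else 0 := hinv e
      by_cases hmem : e ∈ seen
      · -- repeat: A returns 0; the appended list is not Nodup
        have h2 : (dic.insert e (dic.getD e 0 + 1)).getD e 0 = 2 := by
          rw [PySem.Dict.getD_insert_self, hget]; simp [hmem]
        have hnot : ¬ (seen ++ e :: List.filter (fun e => !decide (e = 0)) rest).Nodup := by
          intro h
          exact (List.disjoint_of_nodup_append h) hmem (by simp)
        simp [checkunitLoop, he, h2, hnot]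
      · -- fresh value: recurse with seen ++ [e]
        have h1 : (dic.insert e (dic.getD e 0 + 1)).getD e 0 = 1 := by
          rw [PySem.Dict.getD_insert_self, hget]; simp [hmem]
        have hnd' : (seen ++ [e]).Nodup := by
          rw [List.nodup_append]
          refine ⟨hnd, List.nodup_singleton e, ?_⟩
          intro a ha b hb
          rw [List.mem_singleton] at hb
          subst hb
          exact fun h => hmem (h ▸ ha)
        have hinv' : ∀ a, (dic.insert e (dic.getD e 0 + 1)).getD a 0
            = if a ∈ seen ++ [e] then 1 else 0 := by
          intro a
          rw [PySem.Dict.getD_insert]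
          by_cases hae : a = e
          · subst hae; simp [hget, hmem]
          · simp [hae, hinv a]
        have := ih (dic.insert e (dic.getD e 0 + 1)) (seen ++ [e]) hnd' hinv'
        simp only [checkunitLoop, h1]
        rw [if_pos he, if_neg (by omega : ¬ (1:Int) > 1), this]
        simp [List.append_assoc, he]

lemma checkunit_eq_nodup (lst : List Int) :
    checkunit lst = if (lst.filter (fun e => decide (e ≠ 0))).Nodup then 1 else 0 := by
  have := checkunitLoop_eq lst PySem.Dict.empty [] List.nodup_nil
    (by intro a; simp [PySem.Dict.getD_empty])
  simpa [checkunit] using this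

-- on a ≤-sorted list, an adjacent equal pair exists iff the list has a duplicate
lemma adj_any_eq (l : List Int) (h : l.Pairwise (· ≤ ·)) :
    ((l.zip (l.drop 1)).any (fun p => p.1 == p.2)) = !decide l.Nodup := by
  induction l with
  | nil => simp
  | cons a t ih =>
    match t, h with
    | [], _ => simp
    | b :: t', h =>
      rcases List.pairwise_cons.1 h with ⟨ha, hpw⟩
      have hab : a ≤ b := ha b List.mem_cons_self
      have hrec := ih hpw
      simp only [List.drop_succ_cons, List.drop_zero] at hrec ⊢
      by_cases hEq : a = b
      · have hmem : a ∈ b :: t' := hEq ▸ List.mem_cons_self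
        have hnd : ¬ (a :: b :: t').Nodup := fun hnd => (List.nodup_cons.1 hnd).1 hmem
        simp [List.zip, hEq, hnd]
      · have hnot : a ∉ b :: t' := by
          intro hm
          rcases List.mem_cons.1 hm with h1 | h1
          · exact hEq h1
          · exact hEq (le_antisymm hab ((List.pairwise_cons.1 hpw).1 a h1))
        simp only [List.zip] at hrec ⊢
        simp [List.nodup_cons, hnot, hEq, hrec]

lemma checkunit_alt_eq_nodup (lst : List Int) :
    checkunit_alt lst = if (lst.filter (fun e => decide (e ≠ 0))).Nodup then 1 else 0 := by
  simp only [checkunit_alt]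
  set vals := PySem.List.sorted (lst.filter (fun e => decide (e ≠ 0))) (fun x => x) false with hv
  have hperm : vals.Perm (lst.filter (fun e => decide (e ≠ 0))) := PySem.List.sorted_perm _ _ _
  have hpw : vals.Pairwise (fun a b => a ≤ b) :=
    hv ▸ PySem.List.sorted_pairwise (lst.filter (fun e => decide (e ≠ 0))) (fun x => x)
  have hadj := adj_any_eq vals hpw
  rw [hadj]
  by_cases hnd : (lst.filter (fun e => decide (e ≠ 0))).Nodup
  · have hv' : vals.Nodup := hperm.nodup_iff.2 hnd
    simp only [ne_eq, decide_not] at hnd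
    simp [hv', hnd]
  · have hv' : ¬ vals.Nodup := fun h => hnd (hperm.nodup_iff.1 h)
    simp only [ne_eq, decide_not] at hnd
    simp [hv', hnd]

-- ===== VERDICT (by name: the statement is the Claim_ definition above) =====
theorem checkunit_spec : Claim_equal_checkunit := by
  intro lst _ _
  unfold Spec_checkunit
  rw [checkunit_eq_nodup, checkunit_alt_eq_nodup]
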